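-- pv_equiv track=rewrite | github.com/S0NGMinHyuk/programmers-file | level 0/babbling.py | solution
-- ===== SOURCE A (Python) =====
-- def solution(babbling):  # 내 풀이
--     answer = 0
--     for word in babbling:
--         if word[0] == "a" and len(word) >= 3:    # aya 탐색
--             if word[1] == "y":
--                 if word[2] == "a":
--                     if len(word) != 3:
--                         babbling.append(word[3:])
--                         continue
--                     else:
--                         answer += 1
--                 else:
--                     None
--             else:
--                 None
--         elif word[0] == "y" and len(word) >= 2:   # ye 탐색
--             if word[1] == "e":
--                 if len(word) != 2:
--                     babbling.append(word[2:])
--                     continue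
--                 else:
--                     answer += 1
--             else:
--                 None
--         elif word[0] == "w" and len(word) >= 3:    # woo 탐색
--             if word[1] == "o":
--                 if word[2] == "o":
--                     if len(word) != 3:
--                         babbling.append(word[3:])
--                         continue
--                     else:
--                         answer += 1
--                 else:
--                     None
--             else:
--                 None
--         elif word[0] == "m" and len(word) >= 2:     # ma 탐색
--             if word[1] == "a":
--                 if len(word) != 2:
--                     babbling.append(word[2:])
--                     continue
--                 else:
--                     answer += 1
--             else:
--                 None
--         else:
--             None
--     return answer
-- ===== SOURCE B (Python) =====
-- def solution(babbling):
--     def ok(word):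
--         i = 0
--         n = len(word)
--         while i < n:
--             if word.startswith("aya", i):
--                 i += 3
--             elif word.startswith("ye", i):
--                 i += 2
--             elif word.startswith("woo", i):
--                 i += 3
--             elif word.startswith("ma", i):
--                 i += 2
--             else:
--                 return False
--         return True
--     return sum(ok(word) for word in babbling)
-- ===== Notes on version B (the rewrite author's own statement) =====
-- stated objective: alternative
-- what changed: Replace A's self-appending worklist (A appends the sliced remainder of each word back onto the input list it is iterating over, one suffix copy per matched token) with a single linear index scan per word over the four distinct-first-letter tokens via str.startswith; no slicing and no mutation of the input list.
import Mathlib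
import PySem

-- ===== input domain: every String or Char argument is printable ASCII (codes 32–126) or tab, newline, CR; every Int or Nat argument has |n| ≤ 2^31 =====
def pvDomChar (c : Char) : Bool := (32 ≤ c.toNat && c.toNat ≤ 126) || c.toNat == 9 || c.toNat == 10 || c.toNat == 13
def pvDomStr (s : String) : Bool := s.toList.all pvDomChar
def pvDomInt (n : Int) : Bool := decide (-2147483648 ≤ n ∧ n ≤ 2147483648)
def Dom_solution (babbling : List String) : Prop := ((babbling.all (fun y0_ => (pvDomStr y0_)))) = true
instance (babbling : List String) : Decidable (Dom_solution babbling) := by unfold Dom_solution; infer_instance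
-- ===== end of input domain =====

-- B replaces A's self-appending worklist (A appends the sliced remainder of each word back onto
-- the input list, one suffix copy per matched token) with one linear index scan per word.
-- NOTE: Python A MUTATES its argument (appends suffixes to `babbling`); B does not.
-- The equivalence proved here is about the RETURN value only.

-- ===== PORT A =====
-- A's for-loop iterates by index over the list it is appending to: that is exactly a worklist
-- processed front to back with new items appended at the end.  Strings are handled as their
-- char lists (PySem bridge); word[k] is PySem.List.pyGet?, word[3:]/word[2:] is List.drop
-- (exact for a nonnegative slice start).  On the empty word Python raises IndexError
-- (excluded by Pre_solution); there pyGet? returns none and every branch test fails.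
def goA : List (List Char) → Int → Int
  | [], acc => acc
  | w :: rest, acc =>
    if h1 : PySem.List.pyGet? w 0 = some 'a' ∧ 3 ≤ w.length then      -- aya 탐색
      if h2 : PySem.List.pyGet? w 1 = some 'y' then
        if h3 : PySem.List.pyGet? w 2 = some 'a' then
          if h4 : w.length ≠ 3 then goA (rest ++ [w.drop 3]) acc
          else goA rest (acc + 1)
        else goA rest acc
      else goA rest acc
    else if h5 : PySem.List.pyGet? w 0 = some 'y' ∧ 2 ≤ w.length then -- ye 탐색
      if h6 : PySem.List.pyGet? w 1 = some 'e' then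
        if h7 : w.length ≠ 2 then goA (rest ++ [w.drop 2]) acc
        else goA rest (acc + 1)
      else goA rest acc
    else if h8 : PySem.List.pyGet? w 0 = some 'w' ∧ 3 ≤ w.length then -- woo 탐색
      if h9 : PySem.List.pyGet? w 1 = some 'o' then
        if h10 : PySem.List.pyGet? w 2 = some 'o' then
          if h11 : w.length ≠ 3 then goA (rest ++ [w.drop 3]) acc
          else goA rest (acc + 1)
        else goA rest acc
      else goA rest acc
    else if h12 : PySem.List.pyGet? w 0 = some 'm' ∧ 2 ≤ w.length then -- ma 탐색
      if h13 : PySem.List.pyGet? w 1 = some 'a' then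
        if h14 : w.length ≠ 2 then goA (rest ++ [w.drop 2]) acc
        else goA rest (acc + 1)
      else goA rest acc
    else goA rest acc
  termination_by ws _ => (ws.map fun w => w.length + 1).sum
  decreasing_by all_goals simp [List.map_append] <;> omega

def solution (babbling : List String) : Int :=
  goA (babbling.map String.toList) 0

-- ===== PORT B =====
-- Source B's `ok`: a while loop advancing an index over the word, trying the four tokens by
-- startswith at the index; here the scanned position is the remaining char list.
def okB : List Char → Bool
  | [] => true                       -- i == n: the whole word was consumed
  | 'a' :: 'y' :: 'a' :: t => okB t  -- word.startswith("aya", i): i += 3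
  | 'y' :: 'e' :: t => okB t         -- word.startswith("ye", i):  i += 2
  | 'w' :: 'o' :: 'o' :: t => okB t  -- word.startswith("woo", i): i += 3
  | 'm' :: 'a' :: t => okB t         -- word.startswith("ma", i):  i += 2
  | _ => false                       -- no token matches: return False

def solution_alt (babbling : List String) : Int :=
  babbling.foldl (fun acc w => acc + (if okB w.toList then 1 else 0)) 0

-- ===== PRECONDITION & SPEC =====
-- Pre_ excludes lists containing the empty string: there Python A raises IndexError (word[0]).
def Pre_solution (babbling : List String) : Prop := ∀ w ∈ babbling, w ≠ ""
instance (babbling : List String) : Decidable (Pre_solution babbling) := by unfold Pre_solution; infer_instance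
def pvWitness_solution : List String := (["aya", "wooma", "uhm"])

def Spec_solution (babbling : List String) (out : Int) : Prop := out = solution_alt babbling
instance (babbling : List String) (out : Int) : Decidable (Spec_solution babbling out) := by unfold Spec_solution; infer_instance

-- ===== CLAIM (what is proved, stated in full; the proofs are below) =====
def Claim_equal_solution : Prop := ∀ (babbling : List String), Dom_solution babbling → Pre_solution babbling → Spec_solution babbling (solution babbling)

-- ===== LEMMAS AND PROOFS =====

-- contribution of one worklist entry: empty entries contribute 0 (inside Pre_ nothing is lost,
-- since suffixes A appends are never empty)
def cntB (w : List Char) : Int := if w = [] then 0 else if okB w then 1 else 0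

theorem shape_of_pyGet? (w : List Char) (a : Char) (h0 : PySem.List.pyGet? w 0 = some a) :
    ∃ t, w = a :: t := by
  cases w with
  | nil => simp [PySem.List.pyGet?, PySem.List.pyIdx?] at h0
  | cons x t =>
    rw [PySem.List.pyGet?_zero_cons] at h0
    exact ⟨t, by simp_all⟩

theorem okB_aya (t : List Char) : okB ('a' :: 'y' :: 'a' :: t) = okB t := by simp [okB]
theorem okB_ye (t : List Char) : okB ('y' :: 'e' :: t) = okB t := by simp [okB]
theorem okB_woo (t : List Char) : okB ('w' :: 'o' :: 'o' :: t) = okB t := by simp [okB]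
theorem okB_ma (t : List Char) : okB ('m' :: 'a' :: t) = okB t := by simp [okB]

theorem shape2 (w : List Char) (a b : Char)
    (h0 : PySem.List.pyGet? w 0 = some a) (h1 : PySem.List.pyGet? w 1 = some b) :
    ∃ t, w = a :: b :: t := by
  obtain ⟨t0, rfl⟩ := shape_of_pyGet? _ _ h0
  rw [show ((1:Int)) = ((1:Nat):Int) by norm_num, PySem.List.pyGet?_natCast] at h1
  rcases t0 with _ | ⟨y, t⟩ <;> simp_all

theorem shape3 (w : List Char) (a b c : Char)
    (h0 : PySem.List.pyGet? w 0 = some a) (h1 : PySem.List.pyGet? w 1 = some b)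
    (h2 : PySem.List.pyGet? w 2 = some c) :
    ∃ t, w = a :: b :: c :: t := by
  obtain ⟨t0, rfl⟩ := shape2 _ _ _ h0 h1
  rw [show ((2:Int)) = ((2:Nat):Int) by norm_num, PySem.List.pyGet?_natCast] at h2
  rcases t0 with _ | ⟨z, t⟩ <;> simp_all

theorem pyGet1_ne (w : List Char) (a b c : Char) (t : List Char) (hw : w = a :: b :: t)
    (h : ¬ PySem.List.pyGet? w 1 = some c) : b ≠ c := by
  subst hw; intro hbc; subst hbc
  exact h (by rw [show ((1:Int)) = ((1:Nat):Int) by norm_num, PySem.List.pyGet?_natCast]; simp)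

theorem pyGet2_ne (w : List Char) (a b c d : Char) (t : List Char) (hw : w = a :: b :: c :: t)
    (h : ¬ PySem.List.pyGet? w 2 = some d) : c ≠ d := by
  subst hw; intro hcd; subst hcd
  exact h (by rw [show ((2:Int)) = ((2:Nat):Int) by norm_num, PySem.List.pyGet?_natCast]; simp)

theorem goA_sum (ws : List (List Char)) (acc : Int) :
    goA ws acc = acc + (ws.map cntB).sum := by
  fun_induction goA ws acc with
  | case1 acc => simp
  | case2 w rest acc h1 h2 h3 h4 ih =>
    obtain ⟨t, rfl⟩ := shape3 _ _ _ _ h1.1 h2 h3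
    have ht : t ≠ [] := by intro h; apply h4; simp [h]
    rw [ih]; simp [cntB, okB_aya, ht]; ring
  | case3 w rest acc h1 h2 h3 h4 ih =>
    obtain ⟨t, rfl⟩ := shape3 _ _ _ _ h1.1 h2 h3
    have ht : t = [] := by simpa using h4
    subst ht; rw [ih]; simp [cntB, okB_aya, okB]; ring
  | case4 w rest acc h1 h2 h3 ih =>
    obtain ⟨t, rfl⟩ := shape2 _ _ _ h1.1 h2
    rcases t with _ | ⟨c, t'⟩
    · simp at h1
    · have hne : c ≠ 'a' := pyGet2_ne _ _ _ _ _ _ rfl h3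
      rw [ih]; simp [cntB, okB, hne]
  | case5 w rest acc h1 h2 ih =>
    obtain ⟨t, rfl⟩ := shape_of_pyGet? _ _ h1.1
    rcases t with _ | ⟨c, t'⟩
    · simp at h1
    · have hne : c ≠ 'y' := pyGet1_ne _ _ _ _ _ rfl h2
      rw [ih]; rcases t' with _ | ⟨c2, t2⟩ <;> simp [cntB, okB, hne]
  | case6 w rest acc h1 h5 h6 h7 ih =>
    obtain ⟨t, rfl⟩ := shape2 _ _ _ h5.1 h6
    have ht : t ≠ [] := by intro h; apply h7; simp [h]
    rw [ih]; simp [cntB, okB_ye, ht]; ring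
  | case7 w rest acc h1 h5 h6 h7 ih =>
    obtain ⟨t, rfl⟩ := shape2 _ _ _ h5.1 h6
    have ht : t = [] := by simpa using h7
    subst ht; rw [ih]; simp [cntB, okB_ye, okB]; ring
  | case8 w rest acc h1 h5 h6 ih =>
    obtain ⟨t, rfl⟩ := shape_of_pyGet? _ _ h5.1
    rcases t with _ | ⟨c, t'⟩
    · simp at h5
    · have hne : c ≠ 'e' := pyGet1_ne _ _ _ _ _ rfl h6
      rw [ih]; rcases t' with _ | ⟨c2, t2⟩ <;> simp [cntB, okB, hne]
  | case9 w rest acc h1 h5 h8 h9 h10 h11 ih =>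
    obtain ⟨t, rfl⟩ := shape3 _ _ _ _ h8.1 h9 h10
    have ht : t ≠ [] := by intro h; apply h11; simp [h]
    rw [ih]; simp [cntB, okB_woo, ht]; ring
  | case10 w rest acc h1 h5 h8 h9 h10 h11 ih =>
    obtain ⟨t, rfl⟩ := shape3 _ _ _ _ h8.1 h9 h10
    have ht : t = [] := by simpa using h11
    subst ht; rw [ih]; simp [cntB, okB_woo, okB]; ring
  | case11 w rest acc h1 h5 h8 h9 h10 ih =>
    obtain ⟨t, rfl⟩ := shape2 _ _ _ h8.1 h9
    rcases t with _ | ⟨c, t'⟩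
    · simp at h8
    · have hne : c ≠ 'o' := pyGet2_ne _ _ _ _ _ _ rfl h10
      rw [ih]; simp [cntB, okB, hne]
  | case12 w rest acc h1 h5 h8 h9 ih =>
    obtain ⟨t, rfl⟩ := shape_of_pyGet? _ _ h8.1
    rcases t with _ | ⟨c, t'⟩
    · simp at h8
    · have hne : c ≠ 'o' := pyGet1_ne _ _ _ _ _ rfl h9
      rw [ih]; rcases t' with _ | ⟨c2, t2⟩ <;> simp [cntB, okB, hne]
  | case13 w rest acc h1 h5 h8 h12 h13 h14 ih =>
    obtain ⟨t, rfl⟩ := shape2 _ _ _ h12.1 h13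
    have ht : t ≠ [] := by intro h; apply h14; simp [h]
    rw [ih]; simp [cntB, okB_ma, ht]; ring
  | case14 w rest acc h1 h5 h8 h12 h13 h14 ih =>
    obtain ⟨t, rfl⟩ := shape2 _ _ _ h12.1 h13
    have ht : t = [] := by simpa using h14
    subst ht; rw [ih]; simp [cntB, okB_ma, okB]; ring
  | case15 w rest acc h1 h5 h8 h12 h13 ih =>
    obtain ⟨t, rfl⟩ := shape_of_pyGet? _ _ h12.1
    rcases t with _ | ⟨c, t'⟩
    · simp at h12
    · have hne : c ≠ 'a' := pyGet1_ne _ _ _ _ _ rfl h13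
      rw [ih]; rcases t' with _ | ⟨c2, t2⟩ <;> simp [cntB, okB, hne]
  | case16 w rest acc h1 h5 h8 h12 ih =>
    rcases w with _ | ⟨c, t⟩
    · rw [ih]; simp [cntB]
    · rw [ih]
      have h0 : PySem.List.pyGet? (c :: t) 0 = some c := PySem.List.pyGet?_zero_cons ..
      have hz : cntB (c :: t) = 0 := by
        by_cases hca : c = 'a'
        · subst hca
          have hlen : t.length + 1 < 3 := by
            by_contra h
            exact h1 ⟨h0, by simp; omega⟩
          rcases t with _ | ⟨c1, _ | ⟨c2, t2⟩⟩ <;> simp_all [cntB, okB]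
        · by_cases hcy : c = 'y'
          · subst hcy
            have hlen : t.length + 1 < 2 := by
              by_contra h
              exact h5 ⟨h0, by simp; omega⟩
            rcases t with _ | ⟨c1, t1⟩ <;> simp_all [cntB, okB]
          · by_cases hcw : c = 'w'
            · subst hcw
              have hlen : t.length + 1 < 3 := by
                by_contra h
                exact h8 ⟨h0, by simp; omega⟩
              rcases t with _ | ⟨c1, _ | ⟨c2, t2⟩⟩ <;> simp_all [cntB, okB]
            · by_cases hcm : c = 'm'
              · subst hcm
                have hlen : t.length + 1 < 2 := by
                  by_contra h
                  exact h12 ⟨h0, by simp; omega⟩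
                rcases t with _ | ⟨c1, t1⟩ <;> simp_all [cntB, okB]
              · rcases t with _ | ⟨c1, _ | ⟨c2, t2⟩⟩ <;>
                  simp [cntB, okB, hca, hcy, hcw, hcm]
      simp [hz]


-- ===== VERDICT (by name: the statement is the Claim_ definition above) =====
theorem solution_spec : Claim_equal_solution := by
  intro babbling _ hpre
  unfold Spec_solution solution solution_alt
  rw [goA_sum, PySem.List.foldl_add]
  simp only [zero_add, List.map_map]
  congr 1
  apply List.map_congr_left
  intro w hw
  have hne : w.toList ≠ [] := by
    intro h
    exact hpre w hw (by cases w; simp_all)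
  simp [cntB, Function.comp, hne]
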